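-- pv_equiv track=rewrite | github.com/doc-vu/dag-placement | scripts/heuristics/greedy.py | get_partial_paths_per_node
-- ===== SOURCE A (Python) =====
-- def get_partial_paths_per_node(paths,vertex_node):
--   node_pp={n:[] for n in set(vertex_node.values())}
--   for path in paths:
--     prev_node=vertex_node[path[0]]
--     pp=[]
--     for v in path:
--       curr_node=vertex_node[v]
--       if curr_node==prev_node:
--         pp.append(v)
--       else:
--         node_pp[prev_node].append(pp)
--         pp=[v]
--         prev_node=curr_node
--     node_pp[prev_node].append(pp)
--   return node_pp
-- ===== SOURCE B (Python) =====
-- def get_partial_paths_per_node(paths, vertex_node):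
--     node_pp = {n: [] for n in set(vertex_node.values())}
--     for path in paths:
--         i, m = 0, len(path)
--         while i < m:
--             n = vertex_node[path[i]]
--             j = i + 1
--             while j < m and vertex_node[path[j]] == n:
--                 j += 1
--             node_pp[n].append(path[i:j])
--             i = j
--     return node_pp
-- ===== Notes on version B (the rewrite author's own statement) =====
-- stated objective: alternative
-- what changed: Replaces A's per-element prev/curr state machine (accumulating the current run and flushing it on node change) with a two-pointer run scanner that, for each start index, advances a second index to the end of the contiguous same-node run and appends the slice path[i:j].
import Mathlib
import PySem

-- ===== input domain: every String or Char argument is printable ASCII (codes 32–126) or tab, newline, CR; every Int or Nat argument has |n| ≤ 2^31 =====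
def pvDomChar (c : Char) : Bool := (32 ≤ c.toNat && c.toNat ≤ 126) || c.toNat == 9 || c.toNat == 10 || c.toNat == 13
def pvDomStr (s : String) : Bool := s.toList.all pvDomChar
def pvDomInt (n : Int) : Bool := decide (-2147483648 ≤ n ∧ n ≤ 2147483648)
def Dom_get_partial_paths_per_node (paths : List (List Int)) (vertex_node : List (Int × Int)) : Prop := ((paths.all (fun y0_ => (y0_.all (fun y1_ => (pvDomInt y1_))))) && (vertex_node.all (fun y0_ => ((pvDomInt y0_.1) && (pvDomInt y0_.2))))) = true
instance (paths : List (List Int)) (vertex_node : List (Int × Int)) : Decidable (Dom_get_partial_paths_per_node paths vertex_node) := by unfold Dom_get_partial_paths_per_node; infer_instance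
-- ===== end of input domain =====

-- B replaces A's per-element prev/curr state machine with a two-pointer run scanner
-- (find the end of each contiguous same-node run, append the slice); same cost, different structure.

-- ===== PORT A =====
def get_partial_paths_per_node (paths : List (List Int)) (vertex_node : List (Int × Int)) : List (Int × List (List Int)) :=
  let d := PySem.Dict.ofList vertex_node
  let node_pp : PySem.Dict Int (List (List Int)) :=
    (PySem.Set.ofList d.values).foldl (fun acc n => acc.insert n []) PySem.Dict.empty
  (paths.foldl (fun np path =>
      let prev_node := (d.get? ((PySem.List.pyGet? path 0).getD 0)).getD 0
      let s := path.foldl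
        (fun (s : Int × List Int × PySem.Dict Int (List (List Int))) v =>
          let curr_node := (d.get? v).getD 0
          if curr_node == s.1 then (s.1, s.2.1 ++ [v], s.2.2)
          else (curr_node, [v], s.2.2.modify s.1 [] (· ++ [s.2.1])))
        (prev_node, ([] : List Int), np)
      s.2.2.modify s.1 [] (· ++ [s.2.1]))
    node_pp).items

-- ===== PORT B =====
-- inner while: advance j while path[j] still maps to node n
def pvRunEnd (d : PySem.Dict Int Int) (path : List Int) (n : Int) (j : Nat) : Nat :=
  if _h : j < path.length then
    if (d.get? ((PySem.List.pyGet? path (j : Int)).getD 0)).getD 0 == n then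
      pvRunEnd d path n (j + 1)
    else j
  else j
termination_by path.length - j

theorem le_pvRunEnd (d : PySem.Dict Int Int) (path : List Int) (n : Int) (j : Nat) :
    j ≤ pvRunEnd d path n j := by
  unfold pvRunEnd
  split
  · split
    · exact le_trans (Nat.le_succ j) (le_pvRunEnd d path n (j + 1))
    · exact le_refl j
  · exact le_refl j
termination_by path.length - j

-- outer while: scan runs from index i
def pvScan (d : PySem.Dict Int Int) (path : List Int)
    (np : PySem.Dict Int (List (List Int))) (i : Nat) : PySem.Dict Int (List (List Int)) :=
  if _h : i < path.length then
    let n := (d.get? ((PySem.List.pyGet? path (i : Int)).getD 0)).getD 0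
    let j := pvRunEnd d path n (i + 1)
    pvScan d path (np.modify n [] (· ++ [PySem.List.slice path (some (i : Int)) (some (j : Int))])) j
  else np
termination_by path.length - i
decreasing_by
  have := le_pvRunEnd d path ((d.get? ((PySem.List.pyGet? path (i : Int)).getD 0)).getD 0) (i + 1)
  omega

def get_partial_paths_per_node_alt (paths : List (List Int)) (vertex_node : List (Int × Int)) : List (Int × List (List Int)) :=
  let d := PySem.Dict.ofList vertex_node
  let node_pp : PySem.Dict Int (List (List Int)) :=
    (PySem.Set.ofList d.values).foldl (fun acc n => acc.insert n []) PySem.Dict.empty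
  (paths.foldl (fun np path => pvScan d path np 0) node_pp).items

-- ===== PRECONDITION & SPEC =====
-- Pre_ excludes exactly the inputs where Python A raises: an empty path (IndexError at
-- path[0]) or a path vertex that is not a key of vertex_node (KeyError).
def Pre_get_partial_paths_per_node (paths : List (List Int)) (vertex_node : List (Int × Int)) : Prop :=
  (∀ p ∈ paths, p ≠ []) ∧ (∀ p ∈ paths, ∀ v ∈ p, v ∈ vertex_node.map Prod.fst)
instance (paths : List (List Int)) (vertex_node : List (Int × Int)) : Decidable (Pre_get_partial_paths_per_node paths vertex_node) := by unfold Pre_get_partial_paths_per_node; infer_instance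

def pvWitness_get_partial_paths_per_node : List (List Int) × (List (Int × Int)) :=
  ([[1, 1, 2], [2]], [(1, 10), (2, 20)])

def Spec_get_partial_paths_per_node (paths : List (List Int)) (vertex_node : List (Int × Int)) (out : List (Int × List (List Int))) : Prop := out = get_partial_paths_per_node_alt paths vertex_node
instance (paths : List (List Int)) (vertex_node : List (Int × Int)) (out : List (Int × List (List Int))) : Decidable (Spec_get_partial_paths_per_node paths vertex_node out) := by unfold Spec_get_partial_paths_per_node; infer_instance

-- ===== CLAIM (what is proved, stated in full; the proofs are below) =====
def Claim_equal_get_partial_paths_per_node : Prop := ∀ (paths : List (List Int)) (vertex_node : List (Int × Int)), Dom_get_partial_paths_per_node paths vertex_node → Pre_get_partial_paths_per_node paths vertex_node → Spec_get_partial_paths_per_node paths vertex_node (get_partial_paths_per_node paths vertex_node)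


-- ===== LEMMAS AND PROOFS =====

def pvNode (d : PySem.Dict Int Int) (v : Int) : Int := (d.get? v).getD 0

-- structural version of pvScan: peel off one contiguous run at a time
def pvScanL (d : PySem.Dict Int Int) (np : PySem.Dict Int (List (List Int))) :
    List Int → PySem.Dict Int (List (List Int))
  | [] => np
  | v :: rest =>
    let n := pvNode d v
    pvScanL d (np.modify n [] (· ++ [v :: rest.takeWhile (fun u => pvNode d u == n)]))
      (rest.dropWhile (fun u => pvNode d u == n))
termination_by l => l.length
decreasing_by
  have := List.length_dropWhile_le (fun u => pvNode d u == pvNode d v) rest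
  simp only [List.length_cons]; omega

theorem pvRunEnd_eq (d : PySem.Dict Int Int) (path : List Int) (n : Int) (j : Nat) :
    pvRunEnd d path n j = j + ((path.drop j).takeWhile (fun u => pvNode d u == n)).length := by
  unfold pvRunEnd
  by_cases h : j < path.length
  · rw [List.drop_eq_getElem_cons h]
    simp only [h, dif_pos, PySem.List.pyGet?_natCast, List.getElem?_eq_getElem h, Option.getD_some,
      List.takeWhile_cons]
    by_cases hc : (d.get? path[j]).getD 0 = n
    · rw [pvRunEnd_eq d path n (j + 1)]
      simp only [pvNode, hc, beq_self_eq_true, if_pos, List.length_cons]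
      omega
    · simp [pvNode, hc]
  · simp [h, List.drop_eq_nil_of_le (le_of_not_gt h)]
termination_by path.length - j

theorem pvScan_eq_pvScanL (d : PySem.Dict Int Int) (path : List Int)
    (np : PySem.Dict Int (List (List Int))) (i : Nat) :
    pvScan d path np i = pvScanL d np (path.drop i) := by
  unfold pvScan
  by_cases h : i < path.length
  · have hd : path.drop i = path[i] :: path.drop (i + 1) := List.drop_eq_getElem_cons h
    simp only [h, dif_pos, PySem.List.pyGet?_natCast, List.getElem?_eq_getElem h, Option.getD_some]
    set p := fun u => pvNode d u == (d.get? path[i]).getD 0 with hp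
    set t := ((path.drop (i + 1)).takeWhile p).length with ht
    have hre : pvRunEnd d path ((d.get? path[i]).getD 0) (i + 1) = i + 1 + t := by
      rw [pvRunEnd_eq]
    have htake : (path.drop (i + 1)).take t = (path.drop (i + 1)).takeWhile p :=
      (List.prefix_iff_eq_take.mp (List.takeWhile_prefix p)).symm
    have hslice : PySem.List.slice path (some (i : Int))
          (some ((pvRunEnd d path ((d.get? path[i]).getD 0) (i + 1) : Nat) : Int))
        = path[i] :: (path.drop (i + 1)).takeWhile p := by
      rw [PySem.List.slice_natCast, hre]
      have h1 : i + 1 + t - i = t + 1 := by omega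
      rw [h1, hd, List.take_succ_cons, htake]
    have hdrop : path.drop (pvRunEnd d path ((d.get? path[i]).getD 0) (i + 1))
        = (path.drop (i + 1)).dropWhile p := by
      rw [hre]
      have h1 : (path.drop (i + 1)).drop t = path.drop (i + 1 + t) := by
        rw [List.drop_drop]
      rw [← h1]
      conv_lhs => rw [← List.takeWhile_append_dropWhile (p := p) (l := path.drop (i + 1)), ht]
      exact List.drop_left
    rw [pvScan_eq_pvScanL d path _ _, hslice, hdrop]
    rw [hd]
    conv_rhs => rw [pvScanL]
    simp [pvNode, hp]
  · simp [h, List.drop_eq_nil_of_le (le_of_not_gt h), pvScanL]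
termination_by path.length - i
decreasing_by
  have := le_pvRunEnd d path ((d.get? path[i]).getD 0) (i + 1)
  omega

-- A's inner state machine, split into its fold function and the final flush
def pvF (d : PySem.Dict Int Int) :
    (Int × List Int × PySem.Dict Int (List (List Int))) → Int →
      (Int × List Int × PySem.Dict Int (List (List Int))) :=
  fun s v =>
    let curr_node := (d.get? v).getD 0
    if curr_node == s.1 then (s.1, s.2.1 ++ [v], s.2.2)
    else (curr_node, [v], s.2.2.modify s.1 [] (· ++ [s.2.1]))

def pvFinish (s : Int × List Int × PySem.Dict Int (List (List Int))) :
    PySem.Dict Int (List (List Int)) :=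
  s.2.2.modify s.1 [] (· ++ [s.2.1])

theorem pvFoldA_eq (d : PySem.Dict Int Int) (xs : List Int) :
    ∀ (prev : Int) (pp : List Int) (np : PySem.Dict Int (List (List Int))),
    pvFinish (xs.foldl (pvF d) (prev, pp, np))
    = pvScanL d (np.modify prev [] (· ++ [pp ++ xs.takeWhile (fun u => pvNode d u == prev)]))
        (xs.dropWhile (fun u => pvNode d u == prev)) := by
  induction xs with
  | nil => intro prev pp np; simp [pvScanL, pvFinish]
  | cons v xs ih =>
    intro prev pp np
    simp only [List.foldl_cons, List.takeWhile_cons, List.dropWhile_cons]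
    by_cases hc : (d.get? v).getD 0 = prev
    · have hb : (pvNode d v == prev) = true := by simp [pvNode, hc]
      rw [show pvF d (prev, pp, np) v = (prev, pp ++ [v], np) by simp [pvF, hc]]
      rw [ih prev (pp ++ [v]) np]
      simp [hb, List.append_assoc]
    · have hb : (pvNode d v == prev) = false := by simp [pvNode, hc]
      rw [show pvF d (prev, pp, np) v
          = ((d.get? v).getD 0, [v], np.modify prev [] (· ++ [pp])) by simp [pvF, hc]]
      rw [ih ((d.get? v).getD 0) [v] (np.modify prev [] (· ++ [pp]))]
      simp only [hb, Bool.false_eq_true, if_false]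
      conv_rhs => rw [pvScanL]
      simp [pvNode]

theorem pvStepA_eq_pvScan (d : PySem.Dict Int Int) (np : PySem.Dict Int (List (List Int)))
    (path : List Int) (hne : path ≠ []) :
    pvFinish (path.foldl (pvF d)
        ((d.get? ((PySem.List.pyGet? path 0).getD 0)).getD 0, ([] : List Int), np))
    = pvScan d path np 0 := by
  rw [pvScan_eq_pvScanL]
  simp only [List.drop_zero]
  obtain ⟨v, rest, rfl⟩ := List.exists_cons_of_ne_nil hne
  have h0 : (PySem.List.pyGet? (v :: rest) 0).getD 0 = v := by
    simp
  rw [h0, pvFoldA_eq]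
  have hb : (pvNode d v == (d.get? v).getD 0) = true := by simp [pvNode]
  simp only [List.takeWhile_cons, List.dropWhile_cons, hb, if_true, List.nil_append]
  conv_rhs => rw [pvScanL]
  simp [pvNode]

-- ===== VERDICT (by name: the statement is the Claim_ definition above) =====
theorem get_partial_paths_per_node_spec : Claim_equal_get_partial_paths_per_node := by
  intro paths vertex_node _ hpre
  unfold Spec_get_partial_paths_per_node
  show get_partial_paths_per_node paths vertex_node = get_partial_paths_per_node_alt paths vertex_node
  exact congrArg PySem.Dict.items
    (PySem.List.foldl_congr_mem paths _ _ _
      (fun acc path hmem => pvStepA_eq_pvScan (PySem.Dict.ofList vertex_node) acc path (hpre.1 path hmem)))
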